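-- pv_equiv track=rewrite | github.com/pypi-data/pypi-mirror-350 | packages/deviaTE/deviate-2.2.3.tar.gz/deviate-2.2.3/deviaTE/analyse.py | collapse_internal_deletions
-- ===== SOURCE A (Python) =====
-- from collections import defaultdict
--
-- def collapse_internal_deletions(int_dels: defaultdict) -> defaultdict:
--     """
--     Collapse internal deletions that have almost the same coordinates
--
--     :param int_dels: defaultdict of internal deletions per contig
--     :return: collapsed internal deletions
--     """
--     # loop the contigs
--     int_dels_coll = defaultdict(list)
--
--     for contig, dels in int_dels.items():
--         # sort the deletions
--         dels.sort(key=lambda x: x[0])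
--         # add counts to increment after
--         for i in range(len(dels)):
--             dels[i] = (dels[i][0], dels[i][1], 1)
--
--         # loop the deletions
--         i = 0
--         while i < len(dels) - 1:
--             # check if the next deletion is almost the same
--             if abs(dels[i + 1][0] - dels[i][0]) < 5:
--                 # merge the deletions
--                 dels[i] = (dels[i][0], dels[i][1], dels[i][2] + 1)
--                 # remove the next deletion
--                 dels.pop(i + 1)
--             else:
--                 i += 1
--
--         int_dels_coll[contig] = dels
--
--     return int_dels_coll
-- ===== SOURCE B (Python) =====
-- from collections import defaultdict
--
-- def collapse_internal_deletions(int_dels: defaultdict) -> defaultdict: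
--     """Single linear pass after sorting, keeping a group anchor and a counter
--     instead of repeatedly popping from the list. Does not mutate the input."""
--     int_dels_coll = defaultdict(list)
--     for contig, dels in int_dels.items():
--         groups = []
--         anchor = None
--         count = 0
--         for s, e in sorted(dels, key=lambda x: x[0]):
--             if anchor is not None and abs(s - anchor[0]) < 5:
--                 count += 1
--             else:
--                 if anchor is not None:
--                     groups.append((anchor[0], anchor[1], count))
--                 anchor = (s, e)
--                 count = 1
--         if anchor is not None:
--             groups.append((anchor[0], anchor[1], count))
--         int_dels_coll[contig] = groups
--     return int_dels_coll
-- ===== Notes on version B (the rewrite author's own statement) =====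
-- stated objective: alternative
-- what changed: Replaced A's while-loop that repeatedly pops near-duplicate neighbours out of the sorted list with a single linear pass that keeps a group anchor and a counter and emits each collapsed group once; B also leaves the input unmutated where A sorts and rewrites it in place.
import Mathlib
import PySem

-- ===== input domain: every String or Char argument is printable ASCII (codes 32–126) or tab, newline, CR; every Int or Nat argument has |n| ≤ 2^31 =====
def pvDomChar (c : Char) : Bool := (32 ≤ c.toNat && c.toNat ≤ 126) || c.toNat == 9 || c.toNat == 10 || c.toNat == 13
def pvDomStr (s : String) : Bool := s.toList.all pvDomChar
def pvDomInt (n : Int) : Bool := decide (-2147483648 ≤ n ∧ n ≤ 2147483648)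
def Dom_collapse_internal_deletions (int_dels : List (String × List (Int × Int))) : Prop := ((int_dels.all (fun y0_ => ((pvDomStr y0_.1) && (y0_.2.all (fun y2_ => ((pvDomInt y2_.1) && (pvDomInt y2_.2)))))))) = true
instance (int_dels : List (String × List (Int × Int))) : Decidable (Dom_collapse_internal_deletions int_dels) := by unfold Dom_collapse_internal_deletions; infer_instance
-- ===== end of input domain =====

-- B replaces A's pop-based merge with one linear pass after sorting, keeping a group
-- anchor and a counter (objective: alternative). Equivalence is about the RETURN value
-- only: Python A sorts and rewrites the deletion lists inside its argument in place, B does not.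


-- ===== PORT A =====
-- the 'while i < len(dels) - 1' merge loop of A, with its pop(i + 1)
def aMergeLoop (dels : List (Int × Int × Int)) (i : Nat) : List (Int × Int × Int) :=
  if h : i + 1 < dels.length then
    let cur := dels.getD i (0, 0, 0)
    let nxt := dels.getD (i + 1) (0, 0, 0)
    if |nxt.1 - cur.1| < 5 then
      aMergeLoop ((dels.set i (cur.1, cur.2.1, cur.2.2 + 1)).eraseIdx (i + 1)) i
    else
      aMergeLoop dels (i + 1)
  else dels
termination_by dels.length - i
decreasing_by
  · rw [List.length_eraseIdx_of_lt (by simp; omega)]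
    simp
    omega
  · omega

def collapse_internal_deletions (int_dels : List (String × List (Int × Int))) : List (String × List (Int × Int × Int)) :=
  int_dels.map (fun cd =>
    let dels := PySem.List.sorted cd.2 (fun x => x.1)
    let dels := dels.map (fun p => (p.1, p.2, (1 : Int)))
    (cd.1, aMergeLoop dels 0))

-- ===== PORT B =====
-- B's linear pass: state = (finished groups, current anchor, current count)
def bStep (st : List (Int × Int × Int) × Option (Int × Int) × Int) (p : Int × Int) :
    List (Int × Int × Int) × Option (Int × Int) × Int :=
  match st with
  | (groups, some a, count) =>
      if |p.1 - a.1| < 5 then (groups, some a, count + 1)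
      else (groups ++ [(a.1, a.2, count)], some p, 1)
  | (groups, none, _) => (groups, some p, 1)

def bFlush (st : List (Int × Int × Int) × Option (Int × Int) × Int) : List (Int × Int × Int) :=
  match st with
  | (groups, some a, count) => groups ++ [(a.1, a.2, count)]
  | (groups, none, _) => groups

def collapse_internal_deletions_alt (int_dels : List (String × List (Int × Int))) : List (String × List (Int × Int × Int)) :=
  int_dels.map (fun cd =>
    (cd.1, bFlush ((PySem.List.sorted cd.2 (fun x => x.1)).foldl bStep ([], none, 0))))

-- ===== PRECONDITION & SPEC =====
-- Pre_ excludes association lists with duplicate contig keys: they do not represent a Python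
-- dict (A's parameter is a defaultdict, whose keys are necessarily distinct).
def Pre_collapse_internal_deletions (int_dels : List (String × List (Int × Int))) : Prop :=
  (int_dels.map Prod.fst).Nodup
instance (int_dels : List (String × List (Int × Int))) : Decidable (Pre_collapse_internal_deletions int_dels) := by unfold Pre_collapse_internal_deletions; infer_instance

def pvWitness_collapse_internal_deletions : (List (String × List (Int × Int))) :=
  [("contig1", [(10, 20), (12, 25), (40, 50)]), ("contig2", [(3, 7)])]

def Spec_collapse_internal_deletions (int_dels : List (String × List (Int × Int))) (out : List (String × List (Int × Int × Int))) : Prop := out = collapse_internal_deletions_alt int_dels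
instance (int_dels : List (String × List (Int × Int))) (out : List (String × List (Int × Int × Int))) : Decidable (Spec_collapse_internal_deletions int_dels out) := by unfold Spec_collapse_internal_deletions; infer_instance

-- ===== CLAIM (what is proved, stated in full; the proofs are below) =====
def Claim_equal_collapse_internal_deletions : Prop := ∀ (int_dels : List (String × List (Int × Int))), Dom_collapse_internal_deletions int_dels → Pre_collapse_internal_deletions int_dels → Spec_collapse_internal_deletions int_dels (collapse_internal_deletions int_dels)

-- ===== LEMMAS AND PROOFS =====

-- common reference recursion: one group at a time, anchored at (s, e) with count c
def mergeRef (s e c : Int) : List (Int × Int) → List (Int × Int × Int)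
  | [] => [(s, e, c)]
  | p :: rest =>
      if |p.1 - s| < 5 then mergeRef s e (c + 1) rest
      else (s, e, c) :: mergeRef p.1 p.2 1 rest

theorem aMergeLoop_eq_mergeRef (rest : List (Int × Int)) :
    ∀ (done : List (Int × Int × Int)) (s e c : Int),
    aMergeLoop (done ++ (s, e, c) :: rest.map (fun p => (p.1, p.2, (1 : Int)))) done.length
      = done ++ mergeRef s e c rest := by
  induction rest with
  | nil =>
      intro done s e c
      rw [aMergeLoop]
      simp [mergeRef]
  | cons p rest ih =>
      intro done s e c
      rw [aMergeLoop]
      have hlen : done.length + 1 < (done ++ (s, e, c) :: (p :: rest).map (fun p => (p.1, p.2, (1 : Int)))).length := by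
        simp
      rw [dif_pos hlen]
      have hcur : (done ++ (s, e, c) :: (p :: rest).map (fun p => (p.1, p.2, (1 : Int)))).getD done.length (0,0,0) = (s, e, c) := by
        simp [List.getD_eq_getElem?_getD]
      have hnxt : (done ++ (s, e, c) :: (p :: rest).map (fun p => (p.1, p.2, (1 : Int)))).getD (done.length + 1) (0,0,0) = (p.1, p.2, (1 : Int)) := by
        simp [List.getD_eq_getElem?_getD]
      rw [hcur, hnxt]
      by_cases hc : |p.1 - s| < 5
      · rw [if_pos hc]
        have hset : (done ++ (s, e, c) :: (p :: rest).map (fun p => (p.1, p.2, (1 : Int)))).set done.length (s, e, c + 1)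
            = done ++ (s, e, c + 1) :: (p :: rest).map (fun p => (p.1, p.2, (1 : Int))) := by
          rw [List.set_append_right _ _ (Nat.le_refl _)]
          simp
        rw [hset]
        have herase : (done ++ (s, e, c + 1) :: (p :: rest).map (fun p => (p.1, p.2, (1 : Int)))).eraseIdx (done.length + 1)
            = done ++ (s, e, c + 1) :: rest.map (fun p => (p.1, p.2, (1 : Int))) := by
          rw [List.eraseIdx_append_of_length_le (by omega)]
          simp
        rw [herase, ih done s e (c + 1)]
        simp [mergeRef, hc]
      · rw [if_neg hc]
        have : done.length + 1 = (done ++ [(s, e, c)]).length := by simp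
        rw [show done ++ (s, e, c) :: (p :: rest).map (fun p => (p.1, p.2, (1 : Int)))
              = (done ++ [(s, e, c)]) ++ (p.1, p.2, (1 : Int)) :: rest.map (fun p => (p.1, p.2, (1 : Int))) by simp,
            this, ih (done ++ [(s, e, c)]) p.1 p.2 1]
        simp [mergeRef, hc]

theorem bLoop_eq_mergeRef (rest : List (Int × Int)) :
    ∀ (groups : List (Int × Int × Int)) (s e c : Int),
    bFlush (rest.foldl bStep (groups, some (s, e), c)) = groups ++ mergeRef s e c rest := by
  induction rest with
  | nil => intro groups s e c; simp [bFlush, mergeRef]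
  | cons p rest ih =>
      intro groups s e c
      simp only [List.foldl_cons, bStep, mergeRef]
      by_cases hc : |p.1 - s| < 5
      · rw [if_pos hc, if_pos hc, ih]
      · rw [if_neg hc, if_neg hc, ih]
        simp

theorem perContig_eq (dels : List (Int × Int)) :
    aMergeLoop (dels.map (fun p => (p.1, p.2, (1 : Int)))) 0
      = bFlush (dels.foldl bStep ([], none, 0)) := by
  cases dels with
  | nil => rw [aMergeLoop]; simp [bFlush]
  | cons p rest =>
      have ha := aMergeLoop_eq_mergeRef rest [] p.1 p.2 1
      have hb := bLoop_eq_mergeRef rest [] p.1 p.2 1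
      simp only [List.nil_append, List.length_nil] at ha hb
      simp only [List.map_cons, ha, List.foldl_cons, bStep, hb]

-- ===== VERDICT (by name: the statement is the Claim_ definition above) =====
theorem collapse_internal_deletions_spec : Claim_equal_collapse_internal_deletions := by
  intro int_dels _ _
  unfold Spec_collapse_internal_deletions collapse_internal_deletions collapse_internal_deletions_alt
  refine List.map_congr_left (fun cd _ => ?_)
  simp only [Prod.mk.injEq, true_and]
  exact perContig_eq (PySem.List.sorted cd.2 (fun x => x.1))
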